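-- pv_equiv track=rewrite | github.com/ChanMeng666/juejin-algorithm-practice | juejin11-20/juejin12.py | solution
-- ===== SOURCE A (Python) =====
-- def solution(m:int, s:str)->int:
--     ls = s.split("UCC")
--     ans = len(ls) - 1
--     c1 = c2 = 0
--     for s in ls:
--         i = 0
--         k = len(s)
--         while i < k:
--             if i + 1 < k and s[i + 1] == 'C':
--                 i += 2
--                 c1 += 1
--             else:
--                 i += 1
--                 c2 += 1
--     k1 = min(m, c1)
--     m -= k1
--     ans += k1
--     k2 = min(m >> 1, c2)
--     ans += k2
--     m -= k2 * 2
--     ans += m // 3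
--     return ans
-- ===== SOURCE B (Python) =====
-- def solution(m: int, s: str) -> int:
--     # Character-at-a-time automaton with a small pending buffer ('', one char, or 'UC')
--     # instead of A's split("UCC") followed by a per-segment index while-loop.
--     ans = c1 = c2 = 0
--     buf = ''
--     for c in s:
--         if buf == 'UC':
--             if c == 'C':
--                 ans += 1
--                 buf = ''
--             else:
--                 c1 += 1
--                 buf = c
--         elif buf == '':
--             buf = c
--         elif buf == 'U' and c == 'C':
--             buf = 'UC'
--         elif c == 'C':
--             c1 += 1
--             buf = ''
--         else:
--             c2 += 1
--             buf = c
--     if buf == 'UC':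
--         c1 += 1
--     elif buf:
--         c2 += 1
--     k1 = c1 if c1 < m else m
--     k2 = min((m - k1) >> 1, c2)
--     return ans + k1 + k2 + (m - k1 - 2 * k2) // 3
-- ===== Notes on version B (the rewrite author's own statement) =====
-- stated objective: alternative
-- what changed: Replaced split("UCC") plus a per-segment index while-loop with a single character-at-a-time automaton (for c in s) keeping a pending buffer of at most two characters; the budget arithmetic is folded into one expression.
import Mathlib
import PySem

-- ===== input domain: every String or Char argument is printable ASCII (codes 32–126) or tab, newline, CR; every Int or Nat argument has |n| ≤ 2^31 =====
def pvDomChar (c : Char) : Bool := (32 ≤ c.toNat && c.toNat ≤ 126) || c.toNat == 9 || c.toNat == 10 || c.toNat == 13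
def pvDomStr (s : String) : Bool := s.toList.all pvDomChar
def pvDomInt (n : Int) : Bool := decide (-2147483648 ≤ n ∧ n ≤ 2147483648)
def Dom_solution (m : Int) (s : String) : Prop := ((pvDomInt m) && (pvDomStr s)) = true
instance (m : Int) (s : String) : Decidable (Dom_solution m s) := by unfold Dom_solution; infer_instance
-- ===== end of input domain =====

-- B replaces A's split("UCC")-then-per-segment-while with a character-at-a-time
-- automaton keeping a pending buffer of at most two characters; objective: alternative.

-- ===== PORT A =====
-- the inner `while i < k` loop of A, over one segment; state (i, c1, c2)
def pvPairWhile (seg : List Char) (i : Nat) (c1 c2 : Int) : Int × Int :=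
  if i < seg.length then
    -- `i + 1 < k and s[i+1] == 'C'`
    if i + 1 < seg.length ∧ PySem.List.pyGet? seg ((i : Int) + 1) = some 'C' then
      pvPairWhile seg (i + 2) (c1 + 1) c2
    else
      pvPairWhile seg (i + 1) c1 (c2 + 1)
  else (c1, c2)
termination_by seg.length - i

def solution (m : Int) (s : String) : Int :=
  let ls := PySem.Chars.splitOn s.toList "UCC".toList   -- s.split("UCC")
  let ans : Int := (ls.length : Int) - 1
  let cc := ls.foldl (fun (p : Int × Int) seg => pvPairWhile seg 0 p.1 p.2) (0, 0)
  let k1 := min m cc.1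
  let m1 := m - k1
  let ans1 := ans + k1
  let k2 := min (PySem.Int.floordiv m1 2) cc.2   -- `m >> 1` on a Python int is floor division by 2 (exact, incl. negatives)
  let ans2 := ans1 + k2
  let m2 := m1 - k2 * 2
  ans2 + PySem.Int.floordiv m2 3

-- ===== PORT B =====
-- Source B's pending buffer: '' | a single character | 'UC'
inductive PvBuf where
  | nil : PvBuf
  | one : Char → PvBuf
  | uc : PvBuf
deriving DecidableEq, Repr

-- one iteration of Source B's `for c in s` body; state (buf, ans, c1, c2)
def pvStep : (PvBuf × Int × Int × Int) → Char → PvBuf × Int × Int × Int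
  | (PvBuf.uc, a, x, y), c =>
      if c = 'C' then (PvBuf.nil, a + 1, x, y) else (PvBuf.one c, a, x + 1, y)
  | (PvBuf.nil, a, x, y), c => (PvBuf.one c, a, x, y)
  | (PvBuf.one b, a, x, y), c =>
      if b = 'U' ∧ c = 'C' then (PvBuf.uc, a, x, y)
      else if c = 'C' then (PvBuf.nil, a, x + 1, y)
      else (PvBuf.one c, a, x, y + 1)

-- Source B's flush of the leftover buffer after the loop
def pvFin : PvBuf × Int × Int × Int → Int × Int × Int
  | (PvBuf.uc, a, x, y) => (a, x + 1, y)
  | (PvBuf.one _, a, x, y) => (a, x, y + 1)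
  | (PvBuf.nil, a, x, y) => (a, x, y)

def solution_alt (m : Int) (s : String) : Int :=
  let r := pvFin (s.toList.foldl pvStep (PvBuf.nil, 0, 0, 0))
  let k1 := if r.2.1 < m then r.2.1 else m
  let k2 := min (PySem.Int.floordiv (m - k1) 2) r.2.2
  r.1 + k1 + k2 + PySem.Int.floordiv (m - k1 - 2 * k2) 3

-- ===== PRECONDITION & SPEC =====
def Spec_solution (m : Int) (s : String) (out : Int) : Prop := out = solution_alt m s
instance (m : Int) (s : String) (out : Int) : Decidable (Spec_solution m s out) := by unfold Spec_solution; infer_instance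

-- ===== CLAIM (what is proved, stated in full; the proofs are below) =====
def Claim_equal_solution : Prop := ∀ (m : Int) (s : String), Dom_solution m s → Spec_solution m s (solution m s)

-- ===== LEMMAS AND PROOFS =====

-- clean structural form of A's inner while loop
def pvPairL : List Char → Int × Int
  | [] => (0, 0)
  | _ :: t =>
    if t.head? = some 'C' then ((pvPairL t.tail).1 + 1, (pvPairL t.tail).2)
    else ((pvPairL t).1, (pvPairL t).2 + 1)
termination_by l => l.length
decreasing_by all_goals first | (simp [List.length_tail]; omega) | simp [List.length_tail] | omega

-- the common reference: one greedy left-to-right scan counting (UCC matches, pairs, singles)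
def pvScanL : List Char → Int × Int × Int
  | [] => (0, 0, 0)
  | a :: t =>
    if a = 'U' ∧ t.take 2 = ['C', 'C'] then
      ((pvScanL (t.drop 2)).1 + 1, (pvScanL (t.drop 2)).2.1, (pvScanL (t.drop 2)).2.2)
    else if t.head? = some 'C' then
      ((pvScanL t.tail).1, (pvScanL t.tail).2.1 + 1, (pvScanL t.tail).2.2)
    else
      ((pvScanL t).1, (pvScanL t).2.1, (pvScanL t).2.2 + 1)
termination_by l => l.length
decreasing_by all_goals first | (simp [List.length_tail, List.length_drop]; omega) | simp [List.length_tail, List.length_drop] | omega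

-- clean recursive form of split on "UCC"
def pvSpl : List Char → List (List Char)
  | [] => [[]]
  | a :: t =>
    if ['U', 'C', 'C'].isPrefixOf (a :: t) then [] :: pvSpl ((a :: t).drop 3)
    else
      match pvSpl t with
      | [] => [[a]]   -- unreachable
      | h :: tl => (a :: h) :: tl
termination_by l => l.length
decreasing_by all_goals first | (simp; omega) | simp | omega

-- aggregate of pvPairL over segments
def pvAgg : List (List Char) → Int × Int
  | [] => (0, 0)
  | seg :: xs => ((pvPairL seg).1 + (pvAgg xs).1, (pvPairL seg).2 + (pvAgg xs).2)

-- the characters a buffer state stands for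
def pvBufChars : PvBuf → List Char
  | PvBuf.nil => []
  | PvBuf.one c => [c]
  | PvBuf.uc => ['U', 'C']

theorem pvSpl_ne_nil (l : List Char) : pvSpl l ≠ [] := by
  cases l with
  | nil => simp [pvSpl]
  | cons a t =>
    rw [pvSpl]
    split
    · simp
    · split <;> simp

theorem pvSpl_cons_not_prefix (a : Char) (t : List Char)
    (h : ¬ ['U', 'C', 'C'].isPrefixOf (a :: t) = true) :
    pvSpl (a :: t) = (a :: (pvSpl t).head!) :: (pvSpl t).tail := by
  rw [pvSpl, if_neg h]
  cases ht : pvSpl t with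
  | nil => exact absurd ht (pvSpl_ne_nil t)
  | cons h0 tl => simp

theorem pvSpl_head_head? (t : List Char) :
    (pvSpl t).head!.head? = none ∨ (pvSpl t).head!.head? = t.head? := by
  cases t with
  | nil => left; simp [pvSpl]
  | cons b t2 =>
    by_cases hp : ['U', 'C', 'C'].isPrefixOf (b :: t2) = true
    · left; rw [pvSpl, if_pos hp]; simp
    · right; rw [pvSpl_cons_not_prefix b t2 hp]; simp

theorem pv_splitOn_go (fuel : Nat) :
    ∀ (l cur : List Char) (acc : List (List Char)), l.length < fuel →
      PySem.Chars.splitOn.go ['U', 'C', 'C'] fuel l cur acc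
        = acc.reverse ++ ((cur.reverse ++ (pvSpl l).head!) :: (pvSpl l).tail) := by
  induction fuel with
  | zero => intro l cur acc h; omega
  | succ fuel ih =>
    intro l cur acc h
    cases l with
    | nil =>
      rw [PySem.Chars.splitOn.go.eq_2 _ _ _ _ (by omega)]
      simp [pvSpl]
    | cons c rest =>
      rw [PySem.Chars.splitOn.go.eq_3]
      by_cases hp : ['U', 'C', 'C'].isPrefixOf (c :: rest) = true
      · rw [if_pos hp]
        have hlen : (List.drop (['U', 'C', 'C'] : List Char).length (c :: rest)).length < fuel := by
          simp at h ⊢; omega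
        rw [ih _ _ _ hlen]
        have hspl : pvSpl (c :: rest) = [] :: pvSpl ((c :: rest).drop 3) := by
          rw [pvSpl, if_pos hp]
        have h3 : (List.drop (['U', 'C', 'C'] : List Char).length (c :: rest))
            = (c :: rest).drop 3 := rfl
        rw [h3, hspl]
        cases hd : pvSpl ((c :: rest).drop 3) with
        | nil => exact absurd hd (pvSpl_ne_nil _)
        | cons h0 tl => simp
      · rw [if_neg hp]
        have hlen : rest.length < fuel := by simp at h; omega
        rw [ih _ _ _ hlen]
        rw [pvSpl_cons_not_prefix c rest hp]
        simp

theorem pv_splitOn_eq (l : List Char) :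
    PySem.Chars.splitOn l ['U', 'C', 'C'] = pvSpl l := by
  have hgo := pv_splitOn_go (l.length + 1) l [] [] (by omega)
  rw [PySem.Chars.splitOn, hgo]
  cases hd : pvSpl l with
  | nil => exact absurd hd (pvSpl_ne_nil l)
  | cons h0 tl => simp

-- relate a Python index test `i+1 < len ∧ s[i+1] == 'C'` to the suffix's head
theorem pv_idx_cond (s : List Char) (i : Nat) :
    ((i + 1 < s.length ∧ PySem.List.pyGet? s ((i : Int) + 1) = some 'C')
      ↔ (s.drop (i + 1)).head? = some 'C') := by
  have hg : PySem.List.pyGet? s (((i + 1 : Nat) : Int)) = s[(i + 1 : Nat)]? :=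
    PySem.List.pyGet?_natCast s (i + 1)
  push_cast at hg
  rw [hg, List.head?_drop]
  constructor
  · rintro ⟨_, h2⟩; exact h2
  · intro h
    have : i + 1 < s.length := by
      by_contra hh
      rw [List.getElem?_eq_none (by omega)] at h
      simp at h
    exact ⟨this, h⟩

-- A's while loop computes pvPairL of the remaining suffix
theorem pvPairWhile_spec (seg : List Char) (i : Nat) (c1 c2 : Int) :
    pvPairWhile seg i c1 c2
      = (c1 + (pvPairL (seg.drop i)).1, c2 + (pvPairL (seg.drop i)).2) := by
  by_cases hi : i < seg.length
  · have hd : seg.drop i = seg[i] :: seg.drop (i + 1) := List.drop_eq_getElem_cons hi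
    by_cases hc : i + 1 < seg.length ∧ PySem.List.pyGet? seg ((i : Int) + 1) = some 'C'
    · have hh : (seg.drop (i + 1)).head? = some 'C' := (pv_idx_cond seg i).mp hc
      rw [pvPairWhile, if_pos hi, if_pos hc]
      rw [pvPairWhile_spec seg (i + 2) (c1 + 1) c2]
      rw [hd, pvPairL, if_pos hh]
      have : (seg.drop (i + 1)).tail = seg.drop (i + 2) := by
        rw [List.tail_drop]
      rw [this]
      simp only [Prod.mk.injEq]
      first | trivial | (refine ⟨?_, ?_, ?_⟩ <;> (first | trivial | rfl | (push_cast; ring) | ring | (push_cast; omega) | omega)) | (refine ⟨?_, ?_⟩ <;> (first | trivial | rfl | (push_cast; ring) | ring | (push_cast; omega) | omega)) | rfl | (push_cast; ring) | ring | (push_cast; omega) | omega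
    · have hh : ¬ (seg.drop (i + 1)).head? = some 'C' :=
        fun h => hc ((pv_idx_cond seg i).mpr h)
      rw [pvPairWhile, if_pos hi, if_neg hc]
      rw [pvPairWhile_spec seg (i + 1) c1 (c2 + 1)]
      rw [hd, pvPairL, if_neg hh]
      simp only [Prod.mk.injEq]
      first | trivial | (refine ⟨?_, ?_, ?_⟩ <;> (first | trivial | rfl | (push_cast; ring) | ring | (push_cast; omega) | omega)) | (refine ⟨?_, ?_⟩ <;> (first | trivial | rfl | (push_cast; ring) | ring | (push_cast; omega) | omega)) | rfl | (push_cast; ring) | ring | (push_cast; omega) | omega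
  · rw [pvPairWhile, if_neg hi]
    rw [List.drop_eq_nil_of_le (by omega)]
    simp [pvPairL]
termination_by seg.length - i

-- the foldl over segments accumulates pvAgg
theorem pv_foldl_agg (ls : List (List Char)) (p : Int × Int) :
    ls.foldl (fun (p : Int × Int) seg => pvPairWhile seg 0 p.1 p.2) p
      = (p.1 + (pvAgg ls).1, p.2 + (pvAgg ls).2) := by
  induction ls generalizing p with
  | nil => simp [pvAgg]
  | cons seg xs ih =>
    simp only [List.foldl_cons]
    rw [pvPairWhile_spec seg 0 p.1 p.2]
    simp only [List.drop_zero]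
    rw [ih]
    simp only [pvAgg, Prod.mk.injEq]
    first | trivial | (refine ⟨?_, ?_, ?_⟩ <;> (first | trivial | rfl | (push_cast; ring) | ring | (push_cast; omega) | omega)) | (refine ⟨?_, ?_⟩ <;> (first | trivial | rfl | (push_cast; ring) | ring | (push_cast; omega) | omega)) | rfl | (push_cast; ring) | ring | (push_cast; omega) | omega

-- shape lemmas for pvScanL on explicit list heads
theorem pv_scan_nil : pvScanL [] = (0, 0, 0) := by rw [pvScanL]

theorem pv_scan_one (u : Char) : pvScanL [u] = (0, 0, 1) := by
  rw [pvScanL]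
  simp [pv_scan_nil]

theorem pv_scan_uc : pvScanL ['U', 'C'] = (0, 1, 0) := by
  rw [pvScanL]
  simp [pv_scan_nil]

theorem pv_scan_ucc (t : List Char) :
    pvScanL ('U' :: 'C' :: 'C' :: t)
      = ((pvScanL t).1 + 1, (pvScanL t).2.1, (pvScanL t).2.2) := by
  rw [pvScanL]
  simp

theorem pv_scan_uc_notC (c : Char) (t : List Char) (hc : c ≠ 'C') :
    pvScanL ('U' :: 'C' :: c :: t)
      = ((pvScanL (c :: t)).1, (pvScanL (c :: t)).2.1 + 1, (pvScanL (c :: t)).2.2) := by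
  rw [pvScanL]
  simp [hc]

theorem pv_scan_pair (u : Char) (t : List Char) (hu : u ≠ 'U') :
    pvScanL (u :: 'C' :: t)
      = ((pvScanL t).1, (pvScanL t).2.1 + 1, (pvScanL t).2.2) := by
  rw [pvScanL]
  simp [hu]

theorem pv_scan_sing (u c : Char) (t : List Char) (hc : c ≠ 'C') :
    pvScanL (u :: c :: t)
      = ((pvScanL (c :: t)).1, (pvScanL (c :: t)).2.1, (pvScanL (c :: t)).2.2 + 1) := by
  rw [pvScanL]
  simp [hc]

-- B's automaton fold, flushed, computes pvScanL of buffer-chars ++ rest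
theorem pv_fold_scanL (l : List Char) :
    ∀ (b : PvBuf) (a x y : Int),
      pvFin (l.foldl pvStep (b, a, x, y))
        = (a + (pvScanL (pvBufChars b ++ l)).1,
           x + (pvScanL (pvBufChars b ++ l)).2.1,
           y + (pvScanL (pvBufChars b ++ l)).2.2) := by
  induction l with
  | nil =>
    intro b a x y
    cases b <;>
      simp only [List.foldl_nil, pvFin, pvBufChars, List.append_nil, pv_scan_nil,
        pv_scan_one, pv_scan_uc, Prod.mk.injEq] <;>
      first | trivial | (refine ⟨?_, ?_, ?_⟩ <;> (first | trivial | rfl | (push_cast; ring) | ring | (push_cast; omega) | omega)) | (refine ⟨?_, ?_⟩ <;> (first | trivial | rfl | (push_cast; ring) | ring | (push_cast; omega) | omega)) | rfl | (push_cast; ring) | ring | (push_cast; omega) | omega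
  | cons c t ih =>
    intro b a x y
    cases b with
    | nil =>
      simp only [List.foldl_cons, pvStep, pvBufChars, List.nil_append]
      rw [ih]
      rfl
    | uc =>
      by_cases hc : c = 'C'
      · subst hc
        have hstep : pvStep (PvBuf.uc, a, x, y) 'C' = (PvBuf.nil, a + 1, x, y) := by
          simp [pvStep]
        simp only [List.foldl_cons, hstep]
        rw [ih]
        simp only [pvBufChars, List.nil_append, List.cons_append, pv_scan_ucc, Prod.mk.injEq]
        first | trivial | (refine ⟨?_, ?_, ?_⟩ <;> (first | trivial | rfl | (push_cast; ring) | ring | (push_cast; omega) | omega)) | (refine ⟨?_, ?_⟩ <;> (first | trivial | rfl | (push_cast; ring) | ring | (push_cast; omega) | omega)) | rfl | (push_cast; ring) | ring | (push_cast; omega) | omega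
      · have hstep : pvStep (PvBuf.uc, a, x, y) c = (PvBuf.one c, a, x + 1, y) := by
          simp [pvStep, hc]
        simp only [List.foldl_cons, hstep]
        rw [ih]
        simp only [pvBufChars, List.cons_append, List.nil_append,
          pv_scan_uc_notC c t hc, Prod.mk.injEq]
        first | trivial | (refine ⟨?_, ?_, ?_⟩ <;> (first | trivial | rfl | (push_cast; ring) | ring | (push_cast; omega) | omega)) | (refine ⟨?_, ?_⟩ <;> (first | trivial | rfl | (push_cast; ring) | ring | (push_cast; omega) | omega)) | rfl | (push_cast; ring) | ring | (push_cast; omega) | omega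
    | one u =>
      by_cases huc : u = 'U' ∧ c = 'C'
      · obtain ⟨hu, hcc⟩ := huc
        subst hu; subst hcc
        have hstep : pvStep (PvBuf.one 'U', a, x, y) 'C' = (PvBuf.uc, a, x, y) := by
          simp [pvStep]
        simp only [List.foldl_cons, hstep]
        rw [ih]
        rfl
      · by_cases hc : c = 'C'
        · subst hc
          have hu : u ≠ 'U' := fun h => huc ⟨h, rfl⟩
          have hstep : pvStep (PvBuf.one u, a, x, y) 'C' = (PvBuf.nil, a, x + 1, y) := by
            simp [pvStep, hu]
          simp only [List.foldl_cons, hstep]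
          rw [ih]
          simp only [pvBufChars, List.cons_append, List.nil_append,
            pv_scan_pair u t hu, Prod.mk.injEq]
          first | trivial | (refine ⟨?_, ?_, ?_⟩ <;> (first | trivial | rfl | (push_cast; ring) | ring | (push_cast; omega) | omega)) | (refine ⟨?_, ?_⟩ <;> (first | trivial | rfl | (push_cast; ring) | ring | (push_cast; omega) | omega)) | rfl | (push_cast; ring) | ring | (push_cast; omega) | omega
        · have hstep : pvStep (PvBuf.one u, a, x, y) c = (PvBuf.one c, a, x, y + 1) := by
            simp [pvStep, hc]
          simp only [List.foldl_cons, hstep]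
          rw [ih]
          simp only [pvBufChars, List.cons_append, List.nil_append,
            pv_scan_sing u c t hc, Prod.mk.injEq]
          first | trivial | (refine ⟨?_, ?_, ?_⟩ <;> (first | trivial | rfl | (push_cast; ring) | ring | (push_cast; omega) | omega)) | (refine ⟨?_, ?_⟩ <;> (first | trivial | rfl | (push_cast; ring) | ring | (push_cast; omega) | omega)) | rfl | (push_cast; ring) | ring | (push_cast; omega) | omega

-- main: the merged scan equals split-count + per-segment pair counts
theorem pv_scanL_eq_spl (l : List Char) :
    pvScanL l = (((pvSpl l).length : Int) - 1, (pvAgg (pvSpl l)).1, (pvAgg (pvSpl l)).2) := by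
  cases l with
  | nil =>
    have h1 : pvPairL [] = (0, 0) := by rw [pvPairL]
    rw [pvScanL, pvSpl]
    simp [pvAgg, h1]
  | cons a t =>
    by_cases hU : a = 'U' ∧ t.take 2 = ['C', 'C']
    · -- "UCC" match: split gains an empty segment
      obtain ⟨ha, ht⟩ := hU
      have ht' : t = 'C' :: 'C' :: t.drop 2 := by
        have h2 := List.take_append_drop 2 t
        rw [ht] at h2
        exact h2.symm
      have hp : ['U', 'C', 'C'].isPrefixOf (a :: t) = true := by
        rw [ha]
        conv_lhs => rw [ht']
        simp [List.isPrefixOf]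
      have hspl : pvSpl (a :: t) = [] :: pvSpl (t.drop 2) := by
        rw [pvSpl, if_pos hp]
        have h3 : (a :: t).drop 3 = t.drop 2 := by
          conv_lhs => rw [ht']
          simp
        rw [h3]
      rw [pvScanL, if_pos ⟨ha, ht⟩, hspl, pv_scanL_eq_spl (t.drop 2)]
      have hnilpair : pvPairL [] = (0, 0) := by rw [pvPairL]
      simp only [pvAgg, hnilpair, List.length_cons, Prod.mk.injEq]
      push_cast
      first | trivial | (refine ⟨?_, ?_, ?_⟩ <;> (first | trivial | rfl | (push_cast; ring) | ring | (push_cast; omega) | omega)) | (refine ⟨?_, ?_⟩ <;> (first | trivial | rfl | (push_cast; ring) | ring | (push_cast; omega) | omega)) | rfl | (push_cast; ring) | ring | (push_cast; omega) | omega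
    · by_cases hC : t.head? = some 'C'
      · -- pair step: the first segment starts with a non-separator "xC" pair
        obtain ⟨t2, ht2⟩ : ∃ t2, t = 'C' :: t2 := by
          cases t with
          | nil => simp at hC
          | cons x xs => simp at hC; exact ⟨xs, by rw [hC]⟩
        subst ht2
        obtain ⟨H, TL, hsplt2⟩ : ∃ H TL, pvSpl t2 = H :: TL := by
          cases hd : pvSpl t2 with
          | nil => exact absurd hd (pvSpl_ne_nil t2)
          | cons h0 tl => exact ⟨h0, tl, rfl⟩
        have hnp2 : ¬ ['U', 'C', 'C'].isPrefixOf ('C' :: t2) = true := by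
          simp [List.isPrefixOf]
        have hnp1 : ¬ ['U', 'C', 'C'].isPrefixOf (a :: 'C' :: t2) = true := by
          intro hp
          apply hU
          rcases List.isPrefixOf_iff_prefix.mp hp with ⟨r, hr⟩
          cases hr
          exact ⟨rfl, rfl⟩
        have hspl : pvSpl (a :: 'C' :: t2) = (a :: 'C' :: H) :: TL := by
          rw [pvSpl_cons_not_prefix a _ hnp1, pvSpl_cons_not_prefix 'C' t2 hnp2, hsplt2]
          simp
        have hpair : pvPairL (a :: 'C' :: H) = ((pvPairL H).1 + 1, (pvPairL H).2) := by
          rw [pvPairL]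
          simp
        rw [pvScanL, if_neg hU, if_pos hC, List.tail_cons, pv_scanL_eq_spl t2, hspl, hsplt2]
        simp only [pvAgg, hpair, List.length_cons, Prod.mk.injEq]
        push_cast
        first | trivial | (refine ⟨?_, ?_, ?_⟩ <;> (first | trivial | rfl | (push_cast; ring) | ring | (push_cast; omega) | omega)) | (refine ⟨?_, ?_⟩ <;> (first | trivial | rfl | (push_cast; ring) | ring | (push_cast; omega) | omega)) | rfl | (push_cast; ring) | ring | (push_cast; omega) | omega
      · -- single char: the first segment gains one char counted by c2
        have hnp : ¬ ['U', 'C', 'C'].isPrefixOf (a :: t) = true := by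
          intro hp
          rcases List.isPrefixOf_iff_prefix.mp hp with ⟨r, hr⟩
          cases hr
          exact hC rfl
        obtain ⟨H, TL, hsplt⟩ : ∃ H TL, pvSpl t = H :: TL := by
          cases hd : pvSpl t with
          | nil => exact absurd hd (pvSpl_ne_nil t)
          | cons h0 tl => exact ⟨h0, tl, rfl⟩
        have hspl : pvSpl (a :: t) = (a :: H) :: TL := by
          rw [pvSpl_cons_not_prefix a t hnp, hsplt]
          simp
        have hhd : ¬ H.head? = some 'C' := by
          rcases pvSpl_head_head? t with h | h <;> rw [hsplt] at h <;> simp at h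
          · rw [h]; simp
          · rw [h]; exact hC
        have hpair : pvPairL (a :: H) = ((pvPairL H).1, (pvPairL H).2 + 1) := by
          rw [pvPairL, if_neg hhd]
        rw [pvScanL, if_neg hU, if_neg hC, pv_scanL_eq_spl t, hspl, hsplt]
        simp only [pvAgg, hpair, List.length_cons, Prod.mk.injEq]
        push_cast
        first | trivial | (refine ⟨?_, ?_, ?_⟩ <;> (first | trivial | rfl | (push_cast; ring) | ring | (push_cast; omega) | omega)) | (refine ⟨?_, ?_⟩ <;> (first | trivial | rfl | (push_cast; ring) | ring | (push_cast; omega) | omega)) | rfl | (push_cast; ring) | ring | (push_cast; omega) | omega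
termination_by l.length
decreasing_by all_goals first | (subst_vars; simp [List.length_drop]; omega) | (subst_vars; simp [List.length_drop]) | (simp [List.length_drop]; omega) | simp [List.length_drop]

-- ===== VERDICT (by name: the statement is the Claim_ definition above) =====
theorem solution_spec : Claim_equal_solution := by
  intro m s _
  unfold Spec_solution
  simp only [solution, solution_alt]
  have hsep : ("UCC".toList : List Char) = ['U', 'C', 'C'] := rfl
  rw [hsep, pv_splitOn_eq, pv_foldl_agg, pv_fold_scanL]
  simp only [pvBufChars, List.nil_append, zero_add]
  rw [pv_scanL_eq_spl]
  have hk1 : min m (pvAgg (pvSpl s.toList)).1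
      = (if (pvAgg (pvSpl s.toList)).1 < m then (pvAgg (pvSpl s.toList)).1 else m) := by
    split <;> omega
  simp only [hk1]
  have hmul : ∀ k : Int, k * 2 = 2 * k := fun k => by ring
  simp only [hmul]
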